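-- pv_equiv track=rewrite | github.com/Jayesh-Ah/LeetCode-Prob | Basic/Countries at war/countries-at-war.py | Country_at_war
-- ===== SOURCE A (Python) =====
-- def Country_at_war (arr, brr, n) :
--     acount, bcount = 0, 0
--     for i in range(n):
--         if(arr[i]>brr[i]):
--             acount += 1
--         if(arr[i]<brr[i]):
--             bcount += 1
--     if(acount>bcount):
--         return("A")
--     elif(acount<bcount):
--         return("B")
--     else:
--         return("DRAW")
-- ===== SOURCE B (Python) =====
-- def Country_at_war(arr, brr, n):
--     def net(lo, hi):
--         # net advantage of country A over rounds [lo, hi), by divide and conquer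
--         if hi - lo <= 0:
--             return 0
--         if hi - lo == 1:
--             return (arr[lo] > brr[lo]) - (arr[lo] < brr[lo])
--         mid = (lo + hi) // 2
--         return net(lo, mid) + net(mid, hi)
--     d = net(0, n)
--     return "A" if d > 0 else "B" if d < 0 else "DRAW"
-- ===== Notes on version B (the rewrite author's own statement) =====
-- stated objective: alternative
-- what changed: Replaces A's iterative loop maintaining two win counters with a recursive divide-and-conquer that splits the round interval at its midpoint and sums the net advantage of the two halves; only the sign of the net is inspected at the end.
import Mathlib
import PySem

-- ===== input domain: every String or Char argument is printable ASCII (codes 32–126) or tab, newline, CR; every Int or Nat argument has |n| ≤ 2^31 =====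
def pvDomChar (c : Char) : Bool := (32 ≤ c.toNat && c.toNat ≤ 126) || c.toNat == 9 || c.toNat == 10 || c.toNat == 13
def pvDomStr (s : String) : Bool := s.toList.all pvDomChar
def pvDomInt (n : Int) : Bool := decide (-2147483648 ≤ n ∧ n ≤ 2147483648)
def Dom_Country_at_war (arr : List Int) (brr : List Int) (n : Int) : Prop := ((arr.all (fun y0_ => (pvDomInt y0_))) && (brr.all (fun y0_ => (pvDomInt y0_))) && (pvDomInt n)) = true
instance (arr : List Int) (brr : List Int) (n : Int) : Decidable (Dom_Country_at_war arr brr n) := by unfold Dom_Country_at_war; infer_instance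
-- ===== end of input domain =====

-- B replaces A's iterative loop with two win counters by a recursive divide-and-conquer
-- over the round interval, summing the net advantage of the two halves; objective: alternative.

-- ===== PORT A =====
-- the loop body: both ifs, in A's order (pyGetD's default is never reached under Pre_)
def stepA (arr brr : List Int) (p : Int × Int) (i : Int) : Int × Int :=
  let a := PySem.List.pyGetD arr i 0
  let b := PySem.List.pyGetD brr i 0
  let p := if a > b then (p.1 + 1, p.2) else p
  if a < b then (p.1, p.2 + 1) else p

def verdictA (st : Int × Int) : String :=
  if st.1 > st.2 then "A" else if st.1 < st.2 then "B" else "DRAW"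

def Country_at_war (arr : List Int) (brr : List Int) (n : Int) : String :=
  verdictA ((PySem.List.pyRange 0 n 1).foldl (stepA arr brr) (0, 0))

-- ===== PORT B =====
-- Source B's inner 'net(lo, hi)': divide and conquer on the interval of rounds
def netB (arr brr : List Int) (lo hi : Int) : Int :=
  if hi - lo ≤ 0 then 0
  else if hi - lo = 1 then
    (if PySem.List.pyGetD arr lo 0 > PySem.List.pyGetD brr lo 0 then (1 : Int) else 0)
      - (if PySem.List.pyGetD arr lo 0 < PySem.List.pyGetD brr lo 0 then (1 : Int) else 0)
  else
    netB arr brr lo (PySem.Int.floordiv (lo + hi) 2)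
      + netB arr brr (PySem.Int.floordiv (lo + hi) 2) hi
termination_by (hi - lo).toNat
decreasing_by
  · rw [PySem.Int.floordiv_eq_ediv_of_pos (by norm_num : (0:Int) < 2)]; omega
  · rw [PySem.Int.floordiv_eq_ediv_of_pos (by norm_num : (0:Int) < 2)]; omega

def verdictB (d : Int) : String :=
  if d > 0 then "A" else if d < 0 then "B" else "DRAW"

def Country_at_war_alt (arr : List Int) (brr : List Int) (n : Int) : String :=
  verdictB (netB arr brr 0 n)

-- ===== PRECONDITION & SPEC =====
-- Pre_ excludes exactly the inputs where A raises IndexError: n larger than a list length.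
def Pre_Country_at_war (arr : List Int) (brr : List Int) (n : Int) : Prop :=
  n ≤ (arr.length : Int) ∧ n ≤ (brr.length : Int)
instance (arr : List Int) (brr : List Int) (n : Int) : Decidable (Pre_Country_at_war arr brr n) := by unfold Pre_Country_at_war; infer_instance
def pvWitness_Country_at_war : List Int × List Int × Int := ([1, 2, 3], [2, 0, 3], 3)

def Spec_Country_at_war (arr : List Int) (brr : List Int) (n : Int) (out : String) : Prop := out = Country_at_war_alt arr brr n
instance (arr : List Int) (brr : List Int) (n : Int) (out : String) : Decidable (Spec_Country_at_war arr brr n out) := by unfold Spec_Country_at_war; infer_instance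

-- ===== CLAIM =====
def Claim_equal_Country_at_war : Prop := ∀ (arr : List Int) (brr : List Int) (n : Int), Dom_Country_at_war arr brr n → Pre_Country_at_war arr brr n → Spec_Country_at_war arr brr n (Country_at_war arr brr n)

-- ===== LEMMAS AND PROOFS =====

-- the signed outcome of round i
def sgn (arr brr : List Int) (i : Int) : Int :=
  (if PySem.List.pyGetD arr i 0 > PySem.List.pyGetD brr i 0 then (1 : Int) else 0)
    - (if PySem.List.pyGetD arr i 0 < PySem.List.pyGetD brr i 0 then (1 : Int) else 0)

-- A's fold: acount − bcount accumulates the signed outcomes of the visited rounds.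
theorem foldA_sub (arr brr : List Int) :
    ∀ (l : List Int) (ac bc : Int),
      (l.foldl (stepA arr brr) (ac, bc)).1 - (l.foldl (stepA arr brr) (ac, bc)).2
        = ac - bc + (l.map (sgn arr brr)).sum := by
  intro l
  induction l with
  | nil => intro ac bc; simp
  | cons i t ih =>
    intro ac bc
    simp only [List.foldl_cons, List.map_cons, List.sum_cons, stepA, sgn, gt_iff_lt]
    by_cases hgt : PySem.List.pyGetD brr i 0 < PySem.List.pyGetD arr i 0 <;>
      by_cases hlt : PySem.List.pyGetD arr i 0 < PySem.List.pyGetD brr i 0 <;>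
        simp only [hgt, hlt, if_true, if_false, ite_true, ite_false] <;>
          rw [ih] <;> ring

-- B's divide-and-conquer computes the sum of signed outcomes over the interval.
theorem netB_eq_sum (arr brr : List Int) :
    ∀ (k : Nat) (lo hi : Int), (hi - lo).toNat ≤ k →
      netB arr brr lo hi = ((PySem.List.pyRange lo hi 1).map (sgn arr brr)).sum := by
  intro k
  induction k with
  | zero =>
    intro lo hi h
    have h0 : hi - lo ≤ 0 := by omega
    rw [netB]
    simp [h0, PySem.List.pyRange_one_eq_nil (by omega : hi ≤ lo)]
  | succ k ih =>
    intro lo hi h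
    rw [netB]
    by_cases h0 : hi - lo ≤ 0
    · simp [h0, PySem.List.pyRange_one_eq_nil (by omega : hi ≤ lo)]
    · by_cases h1 : hi - lo = 1
      · have : hi = lo + 1 := by omega
        subst this
        simp [PySem.List.pyRange_one_singleton, sgn]
      · have hmid : PySem.Int.floordiv (lo + hi) 2 = (lo + hi) / 2 :=
          PySem.Int.floordiv_eq_ediv_of_pos (by norm_num)
        have hb1 : lo ≤ (lo + hi) / 2 := by omega
        have hb2 : (lo + hi) / 2 ≤ hi := by omega
        rw [if_neg h0, if_neg h1, hmid,
            ih lo ((lo + hi) / 2) (by omega),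
            ih ((lo + hi) / 2) hi (by omega),
            PySem.List.pyRange_one_append lo ((lo + hi) / 2) hi hb1 hb2,
            List.map_append, List.sum_append]

-- ===== VERDICT =====
theorem Country_at_war_spec : Claim_equal_Country_at_war := by
  intro arr brr n _ _
  unfold Spec_Country_at_war Country_at_war Country_at_war_alt
  rw [netB_eq_sum arr brr (n - 0).toNat 0 n (le_refl _)]
  have h := foldA_sub arr brr (PySem.List.pyRange 0 n 1) 0 0
  set st := (PySem.List.pyRange 0 n 1).foldl (stepA arr brr) (0, 0)
  have hsum : ((PySem.List.pyRange 0 n 1).map (sgn arr brr)).sum = st.1 - st.2 := by omega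
  rw [hsum]
  unfold verdictA verdictB
  split_ifs <;> first | rfl | omega
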